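-- pv_equiv track=rewrite | github.com/SanBellino/Danboorurbot | bot_main.py | get_limited_tags
-- ===== SOURCE A (Python) =====
-- def get_limited_tags(post, max_tags=15, max_length=900):
--     all_tags = post.get("tag_string", "").split()  #Extract tags as a list
--     limited_tags = []                              #Final tag list to return
--     current_length = 0
--
--     for tag in all_tags:
--         # Stop if the maximum number of tags is reached
--         if len(limited_tags) >= max_tags:
--             break
--         # Stop if adding this tag would exceed the character limit
--         if current_length + len(tag) + 1 > max_length:
--             break
--         limited_tags.append(tag)
--         current_length += len(tag) + 1  # +1 for the space
--
--     return " ".join(limited_tags)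
-- ===== SOURCE B (Python) =====
-- def get_limited_tags(post, max_tags=15, max_length=900):
--     all_tags = post.get("tag_string", "").split()
--     # prefix-sum table: cum[i] = total length of the first i+1 tags joined by spaces, +1 trailing
--     cum = []
--     total = 0
--     for tag in all_tags:
--         total += len(tag) + 1
--         cum.append(total)
--     # binary search (bisect_right) for how many tags fit the length budget
--     lo, hi = 0, len(cum)
--     while lo < hi:
--         mid = (lo + hi) // 2
--         if cum[mid] <= max_length:
--             lo = mid + 1
--         else:
--             hi = mid
--     k = lo
--     if max_tags < k:
--         k = max_tags
--     if k < 0: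
--         k = 0
--     return " ".join(all_tags[:k])
-- ===== Notes on version B (the rewrite author's own statement) =====
-- stated objective: alternative
-- what changed: Replaces A's incremental greedy loop (running length + early break) with a prefix-sum table over the split tags, a hand-written bisect_right binary search for how many tags fit the length budget, a min-cap at max_tags, and a single slice+join.
import Mathlib
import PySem

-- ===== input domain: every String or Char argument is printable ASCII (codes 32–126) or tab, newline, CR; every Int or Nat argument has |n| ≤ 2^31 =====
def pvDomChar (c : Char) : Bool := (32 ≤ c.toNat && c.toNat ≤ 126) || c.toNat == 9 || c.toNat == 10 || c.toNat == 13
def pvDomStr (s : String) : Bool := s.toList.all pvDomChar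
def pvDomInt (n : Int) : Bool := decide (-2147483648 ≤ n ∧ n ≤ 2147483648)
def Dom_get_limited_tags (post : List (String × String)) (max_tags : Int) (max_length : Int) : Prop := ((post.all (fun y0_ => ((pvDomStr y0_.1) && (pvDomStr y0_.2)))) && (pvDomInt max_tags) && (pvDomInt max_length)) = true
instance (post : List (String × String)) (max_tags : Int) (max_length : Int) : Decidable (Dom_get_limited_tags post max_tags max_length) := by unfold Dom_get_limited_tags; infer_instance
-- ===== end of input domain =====

-- B replaces A's incremental greedy loop with a prefix-sum table plus a binary search
-- (bisect_right) capped by max_tags; an alternative decomposition, not claimed faster.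

-- ===== PORT A =====
-- the for-loop of A: state = (limited_tags, current_length); break = return the accumulator
def getLimitedGoA (tags : List String) (limited : List String) (cur : Int)
    (max_tags : Int) (max_length : Int) : List String :=
  match tags with
  | [] => limited
  | t :: rest =>
    if (limited.length : Int) ≥ max_tags then limited
    else if cur + (PySem.Str.len t) + 1 > max_length then limited
    else getLimitedGoA rest (limited ++ [t]) (cur + PySem.Str.len t + 1) max_tags max_length

def get_limited_tags (post : List (String × String)) (max_tags : Int) (max_length : Int) : String :=
  let all_tags := PySem.Str.split₀ ((PySem.Dict.ofList post).getD "tag_string" "")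
  PySem.Str.join " " (getLimitedGoA all_tags [] 0 max_tags max_length)

-- ===== PORT B =====
-- B's first loop: build the prefix-sum table cum (state = (cum, total))
def getLimitedCumB (tags : List String) (acc : List Int) (total : Int) : List Int × Int :=
  match tags with
  | [] => (acc, total)
  | t :: rest => getLimitedCumB rest (acc ++ [total + PySem.Str.len t + 1]) (total + PySem.Str.len t + 1)

-- B's while-loop: hand-written bisect_right on cum; cum[mid] is in range (0 ≤ mid < hi ≤ len),
-- ported as getD; the loop runs at most hi - lo iterations, supplied as structural fuel
def getLimitedBisectB (cum : List Int) (x : Int) (fuel : Nat) (lo hi : Nat) : Nat :=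
  match fuel with
  | 0 => lo
  | fuel + 1 =>
    if lo < hi then
      let mid := (lo + hi) / 2
      if cum.getD mid 0 ≤ x then getLimitedBisectB cum x fuel (mid + 1) hi
      else getLimitedBisectB cum x fuel lo mid
    else lo

def get_limited_tags_alt (post : List (String × String)) (max_tags : Int) (max_length : Int) : String :=
  let all_tags := PySem.Str.split₀ ((PySem.Dict.ofList post).getD "tag_string" "")
  let cum := (getLimitedCumB all_tags [] 0).1
  let k0 : Int := (getLimitedBisectB cum max_length cum.length 0 cum.length : Int)
  let k1 : Int := if max_tags < k0 then max_tags else k0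
  let k2 : Int := if k1 < 0 then 0 else k1
  PySem.Str.join " " (PySem.List.slice all_tags none (some k2))

-- ===== PRECONDITION & SPEC =====
def Spec_get_limited_tags (post : List (String × String)) (max_tags : Int) (max_length : Int) (out : String) : Prop := out = get_limited_tags_alt post max_tags max_length
instance (post : List (String × String)) (max_tags : Int) (max_length : Int) (out : String) : Decidable (Spec_get_limited_tags post max_tags max_length out) := by unfold Spec_get_limited_tags; infer_instance

-- ===== CLAIM (what is proved, stated in full; the proofs are below) =====
def Claim_equal_get_limited_tags : Prop := ∀ (post : List (String × String)) (max_tags : Int) (max_length : Int), Dom_get_limited_tags post max_tags max_length → Spec_get_limited_tags post max_tags max_length (get_limited_tags post max_tags max_length)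

-- ===== LEMMAS AND PROOFS =====

-- mathematical prefix sums of len+1, relative to a base
def psOf (tags : List String) (base : Int) : List Int :=
  match tags with
  | [] => []
  | t :: rest => (base + t.toList.length + 1) :: psOf rest (base + t.toList.length + 1)

-- how many leading tags the greedy loop accepts under the length budget alone
def fitCount (tags : List String) (cur : Int) (ml : Int) : Nat :=
  match tags with
  | [] => 0
  | t :: rest =>
    if cur + t.toList.length + 1 > ml then 0
    else fitCount rest (cur + t.toList.length + 1) ml + 1

lemma length_psOf (tags : List String) (base : Int) : (psOf tags base).length = tags.length := by
  induction tags generalizing base with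
  | nil => rfl
  | cons t rest ih => simp [psOf, ih]

lemma cumB_fst (tags : List String) (acc : List Int) (total : Int) :
    (getLimitedCumB tags acc total).1 = acc ++ psOf tags total := by
  induction tags generalizing acc total with
  | nil => simp [getLimitedCumB, psOf]
  | cons t rest ih => simp [getLimitedCumB, psOf, ih]

lemma psOf_lb (tags : List String) (base : Int) :
    ∀ j, j < (psOf tags base).length → base + 1 ≤ (psOf tags base).getD j 0 := by
  induction tags generalizing base with
  | nil => intro j hj; simp [psOf] at hj
  | cons t rest ih =>
    intro j hj
    match j with
    | 0 => simp only [psOf, List.getD_cons_zero]; omega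
    | j + 1 =>
      simp only [psOf, List.getD_cons_succ]
      simp only [psOf, List.length_cons] at hj
      have := ih (base + t.toList.length + 1) j (by omega)
      omega

lemma psOf_mono (tags : List String) (base : Int) :
    ∀ i j, i ≤ j → j < (psOf tags base).length →
      (psOf tags base).getD i 0 ≤ (psOf tags base).getD j 0 := by
  induction tags generalizing base with
  | nil => intro i j _ hj; simp [psOf] at hj
  | cons t rest ih =>
    intro i j hij hj
    simp only [psOf, List.length_cons] at hj
    match i, j with
    | 0, 0 => exact le_refl _
    | 0, j + 1 =>
      simp only [psOf, List.getD_cons_zero, List.getD_cons_succ]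
      have := psOf_lb rest (base + t.toList.length + 1) j (by omega)
      omega
    | i + 1, j + 1 =>
      simp only [psOf, List.getD_cons_succ]
      exact ih (base + t.toList.length + 1) i j (by omega) (by omega)

-- fitCount is the exact boundary of the predicate "cum[i] ≤ ml"
lemma fitCount_boundary (tags : List String) (cur ml : Int) :
    fitCount tags cur ml ≤ tags.length ∧
    (∀ i, i < fitCount tags cur ml → (psOf tags cur).getD i 0 ≤ ml) ∧
    (∀ i, fitCount tags cur ml ≤ i → i < tags.length → ml < (psOf tags cur).getD i 0) := by
  induction tags generalizing cur with
  | nil => exact ⟨by simp [fitCount], by simp [fitCount], by simp⟩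
  | cons t rest ih =>
    by_cases hgt : cur + (t.toList.length : Int) + 1 > ml
    · refine ⟨by simp only [fitCount, if_pos hgt]; omega,
        by simp only [fitCount, if_pos hgt]; omega, ?_⟩
      intro i _ hi
      match i with
      | 0 => simp only [psOf, List.getD_cons_zero]; omega
      | i + 1 =>
        simp only [psOf, List.getD_cons_succ]
        simp only [List.length_cons] at hi
        have := psOf_lb rest (cur + t.toList.length + 1) i (by rw [length_psOf]; omega)
        omega
    · obtain ⟨h1, h2, h3⟩ := ih (cur + t.toList.length + 1)
      refine ⟨by simp only [fitCount, if_neg hgt, List.length_cons]; omega, ?_, ?_⟩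
      · intro i hi
        simp only [fitCount, if_neg hgt] at hi
        match i with
        | 0 => simp only [psOf, List.getD_cons_zero]; omega
        | i + 1 =>
          simp only [psOf, List.getD_cons_succ]
          exact h2 i (by omega)
      · intro i hfi hi
        simp only [fitCount, if_neg hgt] at hfi
        simp only [List.length_cons] at hi
        match i with
        | 0 => omega
        | i + 1 =>
          simp only [psOf, List.getD_cons_succ]
          exact h3 i (by omega) (by omega)

-- binary-search invariant: the result is the boundary point of a downward-closed predicate
lemma bisectB_spec (cum : List Int) (x : Int)
    (hmono : ∀ i j, i ≤ j → j < cum.length → cum.getD j 0 ≤ x → cum.getD i 0 ≤ x) :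
    ∀ fuel lo hi, hi - lo ≤ fuel → lo ≤ hi → hi ≤ cum.length →
      (∀ i, i < lo → cum.getD i 0 ≤ x) →
      (∀ i, hi ≤ i → i < cum.length → x < cum.getD i 0) →
      (∀ i, i < getLimitedBisectB cum x fuel lo hi → cum.getD i 0 ≤ x) ∧
      (∀ i, getLimitedBisectB cum x fuel lo hi ≤ i → i < cum.length → x < cum.getD i 0) ∧
      getLimitedBisectB cum x fuel lo hi ≤ cum.length := by
  intro fuel
  induction fuel with
  | zero =>
    intro lo hi hfuel hlohi hhile hbelow habove
    have : lo = hi := by omega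
    subst this
    simp only [getLimitedBisectB]
    exact ⟨hbelow, habove, hhile⟩
  | succ fuel ih =>
    intro lo hi hfuel hlohi hhile hbelow habove
    by_cases h : lo < hi
    · rw [getLimitedBisectB]
      simp only [h, if_pos]
      set mid := (lo + hi) / 2 with hmid
      have hmlt : mid < hi := by omega
      have hmge : lo ≤ mid := by omega
      by_cases hc : cum.getD mid 0 ≤ x
      · simp only [hc, if_pos]
        exact ih (mid + 1) hi (by omega) (by omega) hhile
          (fun i hi' => hmono i mid (by omega) (by omega) hc) habove
      · simp only [hc, if_false]
        exact ih lo mid (by omega) (by omega) (by omega) hbelow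
          (fun i hmi hil => lt_of_not_ge (fun hle => hc (hmono mid i hmi hil hle)))
    · rw [getLimitedBisectB]
      simp only [h, if_false]
      have : lo = hi := by omega
      subst this
      exact ⟨hbelow, habove, hhile⟩

-- accumulator lemma for A's loop
lemma goA_acc (tags : List String) (limited : List String) (cur mt ml : Int) :
    getLimitedGoA tags limited cur mt ml =
      limited ++ getLimitedGoA tags [] cur (mt - limited.length) ml := by
  induction tags generalizing limited cur mt with
  | nil => simp [getLimitedGoA]
  | cons t rest ih =>
    simp only [getLimitedGoA, PySem.Str.len_eq, List.length_nil, Nat.cast_zero]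
    by_cases h1 : (limited.length : Int) ≥ mt
    · rw [if_pos h1, if_pos (by omega : (0 : Int) ≥ mt - limited.length)]
      simp
    · rw [if_neg h1, if_neg (by omega : ¬ ((0 : Int) ≥ mt - limited.length))]
      by_cases h2 : cur + (t.toList.length : Int) + 1 > ml
      · rw [if_pos h2, if_pos h2]
        simp
      · rw [if_neg h2, if_neg h2]
        simp only [List.nil_append]
        rw [ih (limited ++ [t]), ih [t]]
        simp only [List.length_append, List.length_cons, List.length_nil, List.append_assoc,
          List.cons_append, List.nil_append]
        congr 3
        push_cast
        ring

-- A's loop computes the greedy prefix: take (min fitCount mt.toNat)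
lemma goA_eq_take (tags : List String) (cur mt ml : Int) :
    getLimitedGoA tags [] cur mt ml = tags.take (min (fitCount tags cur ml) mt.toNat) := by
  induction tags generalizing cur mt with
  | nil => simp [getLimitedGoA]
  | cons t rest ih =>
    simp only [getLimitedGoA, PySem.Str.len_eq, List.length_nil, Nat.cast_zero]
    by_cases hmt : (0 : Int) ≥ mt
    · rw [if_pos hmt]
      have : mt.toNat = 0 := by omega
      simp [this]
    · rw [if_neg hmt]
      by_cases h2 : cur + (t.toList.length : Int) + 1 > ml
      · rw [if_pos h2]
        simp only [fitCount, if_pos h2]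
        simp
      · rw [if_neg h2, goA_acc, ih]
        simp only [fitCount, if_neg h2]
        have : min (fitCount rest (cur + t.toList.length + 1) ml + 1) mt.toNat =
            min (fitCount rest (cur + t.toList.length + 1) ml) (mt - 1).toNat + 1 := by omega
        rw [this, List.take_succ_cons]
        norm_num

-- ===== VERDICT (by name: the statement is the Claim_ definition above) =====
theorem get_limited_tags_spec : Claim_equal_get_limited_tags := by
  intro post max_tags max_length _
  unfold Spec_get_limited_tags get_limited_tags get_limited_tags_alt
  set tags := PySem.Str.split₀ ((PySem.Dict.ofList post).getD "tag_string" "") with htags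
  simp only
  rw [cumB_fst, List.nil_append]
  set cum := psOf tags 0 with hcum
  obtain ⟨hf1, hf2, hf3⟩ := fitCount_boundary tags 0 max_length
  have hmono : ∀ i j, i ≤ j → j < cum.length → cum.getD j 0 ≤ max_length →
      cum.getD i 0 ≤ max_length := fun i j hij hj hle =>
    le_trans (psOf_mono tags 0 i j hij hj) hle
  obtain ⟨hb1, hb2, hb3⟩ := bisectB_spec cum max_length hmono cum.length 0 cum.length
    (by omega) (by omega) (le_refl _) (by omega) (by omega)
  have hlen : cum.length = tags.length := length_psOf tags 0
  set r := getLimitedBisectB cum max_length cum.length 0 cum.length with hr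
  have hreq : r = fitCount tags 0 max_length := by
    by_contra hne
    rcases Nat.lt_trichotomy r (fitCount tags 0 max_length) with hlt | heq | hlt
    · have h1 : cum.getD r 0 ≤ max_length := hf2 r hlt
      have h2 : max_length < cum.getD r 0 := hb2 r (le_refl r) (by omega)
      omega
    · exact hne heq
    · have h1 : cum.getD (fitCount tags 0 max_length) 0 ≤ max_length :=
        hb1 (fitCount tags 0 max_length) hlt
      have h2 : max_length < cum.getD (fitCount tags 0 max_length) 0 :=
        hf3 (fitCount tags 0 max_length) (le_refl _) (by omega)
      omega
  rw [goA_eq_take]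
  set k1 : Int := if max_tags < (r : Int) then max_tags else (r : Int) with hk1
  set k2 : Int := if k1 < 0 then 0 else k1 with hk2
  have hk2nn : 0 ≤ k2 := by rw [hk2]; split_ifs with h <;> omega
  rw [PySem.List.slice_to tags hk2nn]
  congr 1
  have hk2v : k2.toNat = min (fitCount tags 0 max_length) max_tags.toNat := by
    rw [hk2, hk1, hreq]
    split_ifs <;> omega
  rw [hk2v]
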